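-- pv_equiv track=rewrite | github.com/luanapassosreis/AGN_Studies | AGA_NN_metaheuristics/MetaHeuristics.py | no_dup
-- ===== SOURCE A (Python) =====
-- def no_dup(L_0): # remueve valores duplicados de lista
--     L_n = []
--     L = []
--     index = 0
--     for x in L_0:
--         if x not in L_n:
--             L.append(index)
--             L_n.append(L_0[index])
--         index += 1
--     return  L
-- ===== SOURCE B (Python) =====
-- def no_dup(L_0): # remueve valores duplicados de lista
--     uniques = list(dict.fromkeys(L_0))
--     return [L_0.index(v) for v in uniques]
-- ===== Notes on version B (the rewrite author's own statement) =====
-- stated objective: idiomatic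
-- what changed: Replaces A's single accumulator pass (seen-list + index counter) with a two-phase build-then-rescan: dedup via dict.fromkeys, then L_0.index per unique value.
import Mathlib
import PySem

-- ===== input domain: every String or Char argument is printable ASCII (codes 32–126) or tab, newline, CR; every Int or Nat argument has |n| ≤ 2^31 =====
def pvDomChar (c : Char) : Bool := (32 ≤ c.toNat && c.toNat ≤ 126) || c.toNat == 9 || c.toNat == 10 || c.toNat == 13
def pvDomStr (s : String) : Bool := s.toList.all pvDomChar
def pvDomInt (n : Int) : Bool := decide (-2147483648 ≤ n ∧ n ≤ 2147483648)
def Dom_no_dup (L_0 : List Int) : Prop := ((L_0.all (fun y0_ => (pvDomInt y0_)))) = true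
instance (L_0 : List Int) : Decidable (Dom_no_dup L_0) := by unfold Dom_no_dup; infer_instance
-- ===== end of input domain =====

-- B replaces A's single accumulator pass with a two-phase dedup-then-rescan (dict.fromkeys + L_0.index); same result, alternative structure.

-- ===== PORT A =====
-- loop over the remaining suffix, carrying the seen-values list L_n, the result L and the counter index
def noDupGo (L_0 : List Int) (Ln L : List Int) (index : Int) : List Int → List Int
  | [] => L
  | x :: rest =>
      if Ln.contains x then noDupGo L_0 Ln L (index + 1) rest
      else noDupGo L_0 (Ln ++ [PySem.List.pyGetD L_0 index 0]) (L ++ [index]) (index + 1) rest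

def no_dup (L_0 : List Int) : List Int := noDupGo L_0 [] [] 0 L_0

-- ===== PORT B =====
-- uniques = list(dict.fromkeys(L_0)); [L_0.index(v) for v in uniques]
-- v ∈ uniques ⊆ L_0, so index? is always some; the getD 0 default is unreachable
def no_dup_alt (L_0 : List Int) : List Int :=
  (PySem.List.dedup L_0).map (fun v => ((PySem.List.index? L_0 v).getD 0 : Int))

-- ===== PRECONDITION & SPEC =====
def Spec_no_dup (L_0 : List Int) (out : List Int) : Prop := out = no_dup_alt L_0
instance (L_0 : List Int) (out : List Int) : Decidable (Spec_no_dup L_0 out) := by unfold Spec_no_dup; infer_instance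

-- ===== CLAIM (what is proved, stated in full; the proofs are below) =====
def Claim_equal_no_dup : Prop := ∀ (L_0 : List Int), Dom_no_dup L_0 → Spec_no_dup L_0 (no_dup L_0)

-- ===== LEMMAS AND PROOFS =====

theorem index?_append_cons_self (pre rest : List Int) (x : Int) (hx : x ∉ pre) :
    PySem.List.index? (pre ++ x :: rest) x = some pre.length :=
  (PySem.List.index?_eq_some_iff _ _ _).mpr ⟨pre, rest, rfl, rfl, hx⟩

theorem dedup_append_singleton (pre : List Int) (x : Int) :
    PySem.List.dedup (pre ++ [x]) =
      if x ∈ pre then PySem.List.dedup pre else PySem.List.dedup pre ++ [x] := by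
  have h : PySem.List.dedup (pre ++ [x]) = PySem.Set.add (PySem.List.dedup pre) x := by
    simp [PySem.List.dedup_eq_ofList, PySem.Set.ofList_eq_foldl, List.foldl_append]
  rw [h, PySem.Set.add]
  by_cases hm : x ∈ pre
  · simp [PySem.Set.contains, hm]
  · simp [PySem.Set.contains, hm]

theorem noDupGo_invariant (L_0 : List Int) :
    ∀ (suf pre : List Int), L_0 = pre ++ suf →
      noDupGo L_0 (PySem.List.dedup pre)
        ((PySem.List.dedup pre).map (fun v => ((PySem.List.index? L_0 v).getD 0 : Int)))
        (pre.length : Int) suf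
      = (PySem.List.dedup (pre ++ suf)).map (fun v => ((PySem.List.index? L_0 v).getD 0 : Int)) := by
  intro suf
  induction suf with
  | nil => intro pre h; simp [noDupGo]
  | cons x rest ih =>
      intro pre h
      have hget : PySem.List.pyGetD L_0 (pre.length : Int) 0 = x := by
        subst h
        rw [PySem.List.pyGetD_natCast]
        simp [List.getD_eq_getElem?_getD]
      by_cases hm : x ∈ pre
      · have hc : (PySem.List.dedup pre).contains x = true := by simpa using hm
        have hded : PySem.List.dedup (pre ++ [x]) = PySem.List.dedup pre := by
          rw [dedup_append_singleton, if_pos hm]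
        rw [noDupGo, if_pos hc]
        have := ih (pre ++ [x]) (by simpa using h)
        rw [hded] at this
        simpa [List.append_assoc] using this
      · have hded : PySem.List.dedup (pre ++ [x]) = PySem.List.dedup pre ++ [x] := by
          rw [dedup_append_singleton, if_neg hm]
        have hidx : PySem.List.index? L_0 x = some pre.length := by
          rw [h]; exact index?_append_cons_self pre rest x hm
        rw [noDupGo, if_neg (by simpa using hm), hget]
        have := ih (pre ++ [x]) (by simpa using h)
        rw [hded] at this
        simp only [List.map_append, List.map_cons, List.map_nil, hidx, Option.getD_some,
          List.append_assoc, List.cons_append, List.nil_append] at this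
        simpa [hidx] using this

-- ===== VERDICT (by name: the statement is the Claim_ definition above) =====
theorem no_dup_spec : Claim_equal_no_dup := by
  intro L_0 _
  unfold Spec_no_dup no_dup no_dup_alt
  have := noDupGo_invariant L_0 L_0 [] rfl
  simpa using this
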